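-- pv_equiv track=rewrite | github.com/wlool8793-crypto/lool- | data-collection/src/file_organizer.py | _get_time_period
-- ===== SOURCE A (Python) =====
-- def _get_time_period(year: int) -> str:
--     """
--     Get time period folder name for a year.
--
--     Args:
--         year: Document year
--
--     Returns:
--         Time period string (e.g., '1851-1900')
--     """
--     periods = [
--         (1799, 1850),
--         (1851, 1900),
--         (1901, 1950),
--         (1951, 2000),
--         (2001, 2050),
--         (2051, 2100)
--     ]
--
--     for start, end in periods:
--         if start <= year <= end:
--             return f'{start}-{end}'
--
--     return 'OTHER'
-- ===== SOURCE B (Python) =====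
-- def _get_time_period(year: int) -> str:
--     if 1799 <= year <= 1850:
--         return '1799-1850'
--     if 1851 <= year <= 2100:
--         start = 1851 + 50 * ((year - 1851) // 50)
--         return f'{start}-{start + 49}'
--     return 'OTHER'
-- ===== Notes on version B (the rewrite author's own statement) =====
-- stated objective: idiomatic
-- what changed: Replaces the scan over a hard-coded list of (start,end) pairs with a direct arithmetic computation of the fifty-year bucket (the irregular first bucket handled explicitly).
import Mathlib
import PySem

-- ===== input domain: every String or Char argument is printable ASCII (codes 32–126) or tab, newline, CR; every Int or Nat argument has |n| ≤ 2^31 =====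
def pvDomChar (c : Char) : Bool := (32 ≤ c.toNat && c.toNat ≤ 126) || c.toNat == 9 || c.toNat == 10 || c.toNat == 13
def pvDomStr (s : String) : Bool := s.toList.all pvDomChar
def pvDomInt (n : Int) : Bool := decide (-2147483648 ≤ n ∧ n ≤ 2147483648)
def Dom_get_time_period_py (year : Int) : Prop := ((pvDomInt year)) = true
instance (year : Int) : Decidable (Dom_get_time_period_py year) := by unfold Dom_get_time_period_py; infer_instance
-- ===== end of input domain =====

-- B replaces A's scan over a hard-coded list of (start,end) buckets with an O(1) arithmetic
-- computation of the 50-year bucket (idiomatic; the irregular 1799-1850 bucket handled explicitly).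

-- ===== PORT A =====
-- the loop 'for start, end in periods: if start <= year <= end: return …'
def pvPeriodsLoop (periods : List (Int × Int)) (year : Int) : Option String :=
  match periods with
  | [] => none
  | (s, e) :: rest =>
    if s ≤ year ∧ year ≤ e then some (PySem.Int.toStr s ++ "-" ++ PySem.Int.toStr e)
    else pvPeriodsLoop rest year

def get_time_period_py (year : Int) : String :=
  let periods : List (Int × Int) :=
    [(1799, 1850), (1851, 1900), (1901, 1950), (1951, 2000), (2001, 2050), (2051, 2100)]
  (pvPeriodsLoop periods year).getD "OTHER"

-- ===== PORT B =====
def get_time_period_py_alt (year : Int) : String :=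
  if 1799 ≤ year ∧ year ≤ 1850 then "1799-1850"
  else if 1851 ≤ year ∧ year ≤ 2100 then
    let start := 1851 + 50 * PySem.Int.floordiv (year - 1851) 50
    PySem.Int.toStr start ++ "-" ++ PySem.Int.toStr (start + 49)
  else "OTHER"

-- ===== PRECONDITION & SPEC =====
def Spec_get_time_period_py (year : Int) (out : String) : Prop := out = get_time_period_py_alt year
instance (year : Int) (out : String) : Decidable (Spec_get_time_period_py year out) := by unfold Spec_get_time_period_py; infer_instance

-- ===== CLAIM (what is proved, stated in full; the proofs are below) =====
def Claim_equal_get_time_period_py : Prop := ∀ (year : Int), Dom_get_time_period_py year → Spec_get_time_period_py year (get_time_period_py year)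

-- ===== LEMMAS AND PROOFS =====
-- ===== VERDICT (by name: the statement is the Claim_ definition above) =====
theorem get_time_period_py_spec : Claim_equal_get_time_period_py := by
  intro year _
  unfold Spec_get_time_period_py get_time_period_py get_time_period_py_alt
  by_cases h0 : 1799 ≤ year ∧ year ≤ 1850
  · simp [pvPeriodsLoop, h0]
    decide
  by_cases h1 : 1851 ≤ year ∧ year ≤ 1900
  · have hk : (year - 1851) / 50 = 0 := by omega
    have hm : 1851 ≤ year ∧ year ≤ 2100 := by omega
    have hb0 : year ≤ 1900 := by omega
    simp [pvPeriodsLoop, h0, h1, hm, hk, hb0]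
  by_cases h2 : 1901 ≤ year ∧ year ≤ 1950
  · have hk : (year - 1851) / 50 = 1 := by omega
    have hm : 1851 ≤ year ∧ year ≤ 2100 := by omega
    have hb0 : ¬ year ≤ 1900 := by omega
    have hb1 : year ≤ 1950 := by omega
    simp [pvPeriodsLoop, h0, h1, h2, hm, hk, hb0, hb1]
  by_cases h3 : 1951 ≤ year ∧ year ≤ 2000
  · have hk : (year - 1851) / 50 = 2 := by omega
    have hm : 1851 ≤ year ∧ year ≤ 2100 := by omega
    have hb0 : ¬ year ≤ 1900 := by omega
    have hb1 : ¬ year ≤ 1950 := by omega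
    have hb2 : year ≤ 2000 := by omega
    simp [pvPeriodsLoop, h0, h1, h2, h3, hm, hk, hb0, hb1, hb2]
  by_cases h4 : 2001 ≤ year ∧ year ≤ 2050
  · have hk : (year - 1851) / 50 = 3 := by omega
    have hm : 1851 ≤ year ∧ year ≤ 2100 := by omega
    have hb0 : ¬ year ≤ 1900 := by omega
    have hb1 : ¬ year ≤ 1950 := by omega
    have hb2 : ¬ year ≤ 2000 := by omega
    have hb3 : year ≤ 2050 := by omega
    simp [pvPeriodsLoop, h0, h1, h2, h3, h4, hm, hk, hb0, hb1, hb2, hb3]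
  by_cases h5 : 2051 ≤ year ∧ year ≤ 2100
  · have hk : (year - 1851) / 50 = 4 := by omega
    have hm : 1851 ≤ year ∧ year ≤ 2100 := by omega
    have hb0 : ¬ year ≤ 1900 := by omega
    have hb1 : ¬ year ≤ 1950 := by omega
    have hb2 : ¬ year ≤ 2000 := by omega
    have hb3 : ¬ year ≤ 2050 := by omega
    have hb4 : year ≤ 2100 := by omega
    simp [pvPeriodsLoop, h0, h1, h2, h3, h4, h5, hm, hk, hb0, hb1, hb2, hb3, hb4]
  have hm : ¬(1851 ≤ year ∧ year ≤ 2100) := by omega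
  simp [pvPeriodsLoop, h0, h1, h2, h3, h4, h5, hm]
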